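-- pv_equiv track=rewrite | github.com/DuhoeKim/Algoritm | 0827/PROGRAMERS_2019_KAKAO_BLIND_RECRUITMENT/s3_fail.py | solution
-- ===== SOURCE A (Python) =====
-- def solution(food_times, k):
--     if k >= sum(food_times):
--         return -1
--     N = len(food_times)
--     b = 0
--     while k >= N:
--         k -= N
--         b += 1
--         N = N - (food_times.count(b))
--
--     for i in range(len(food_times)):
--         if food_times[i] - b > 0:
--             k -= 1
--             if k == -1:
--                 return i + 1
-- ===== SOURCE B (Python) =====
-- def solution(food_times, k):
--     if k >= sum(food_times):
--         return -1
--     counts = {}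
--     for v in food_times:
--         if v > 0:
--             counts[v] = counts.get(v, 0) + 1
--     b = 0
--     alive = len(food_times)
--     for v in sorted(counts):
--         step = (v - b) * alive
--         if k < step:
--             break
--         k -= step
--         b = v
--         alive -= counts[v]
--     if alive > 0 and k >= alive:
--         b += k // alive
--         k %= alive
--     i = 0
--     for idx, v in enumerate(food_times):
--         if v > b:
--             if i == k:
--                 return idx + 1
--             i += 1
--     return None
-- ===== Notes on version B (the rewrite author's own statement) =====
-- stated objective: alternative
-- what changed: A peels one hunger level per while-iteration, rescanning the whole list with .count each time and decrementing k to find the answer plate; B counts each amount once into a dict, sorts the distinct amounts, consumes whole levels with one multiplication/division per distinct amount, and picks the k-th survivor in a single indexed scan.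
import Mathlib
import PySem

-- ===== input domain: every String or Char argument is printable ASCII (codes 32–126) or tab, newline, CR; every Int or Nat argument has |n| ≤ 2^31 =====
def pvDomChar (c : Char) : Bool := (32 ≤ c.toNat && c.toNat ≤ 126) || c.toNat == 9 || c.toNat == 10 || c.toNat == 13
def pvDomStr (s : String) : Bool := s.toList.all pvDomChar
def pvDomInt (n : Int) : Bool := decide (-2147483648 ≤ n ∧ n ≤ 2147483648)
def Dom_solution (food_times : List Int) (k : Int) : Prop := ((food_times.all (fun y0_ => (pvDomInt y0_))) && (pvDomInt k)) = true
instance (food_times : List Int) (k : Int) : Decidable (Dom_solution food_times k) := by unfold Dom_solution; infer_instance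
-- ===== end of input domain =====

-- B replaces A's level-by-level peeling (one while-iteration and one full `.count` scan per
-- hunger level) by one counting pass into a dict, a sort of the distinct amounts, a whole-level
-- jump per distinct amount via division, and a single indexed scan; same return value everywhere.

-- ===== PORT A =====
-- while k >= N: k -= N; b += 1; N -= food_times.count(b)
-- (fuel-bounded; fuel = k.toNat + 1 is enough whenever the Python loop terminates: each
--  executed iteration has N ≥ 1 under the k < sum guard, so k strictly decreases — proved below)
def solutionWhile (food_times : List Int) : Nat → Int → Int → Int → Int × Int
  | 0, k, b, _ => (k, b)
  | fuel + 1, k, b, N =>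
    if N ≤ k then
      solutionWhile food_times fuel (k - N) (b + 1) (N - (PySem.List.count food_times (b + 1) : Int))
    else (k, b)

-- for i in range(len(food_times)): if food_times[i] - b > 0: k -= 1; if k == -1: return i + 1
def solutionFor : List Int → Int → Int → Int → Option Int
  | [], _, _, _ => none
  | v :: rest, b, k, i =>
    if 0 < v - b then
      if k - 1 = -1 then some (i + 1) else solutionFor rest b (k - 1) (i + 1)
    else solutionFor rest b k (i + 1)

def solution (food_times : List Int) (k : Int) : Option Int :=
  if food_times.sum ≤ k then some (-1)
  else
    let r := solutionWhile food_times (k.toNat + 1) k 0 (food_times.length : Int)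
    solutionFor food_times r.2 r.1 0

-- ===== PORT B =====
-- counts[v] = counts.get(v, 0) + 1  for positive v
def solutionAltCounts (food_times : List Int) : PySem.Dict Int Int :=
  food_times.foldl (fun d v => if 0 < v then d.insert v (d.getD v 0 + 1) else d) PySem.Dict.empty

-- for v in sorted(counts): step = (v-b)*alive; if k < step: break; k -= step; b = v; alive -= counts[v]
def solutionAltLoop (counts : PySem.Dict Int Int) : List Int → Int → Int → Int → Int × Int × Int
  | [], k, b, alive => (k, b, alive)
  | v :: rest, k, b, alive =>
    if k < (v - b) * alive then (k, b, alive)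
    else solutionAltLoop counts rest (k - (v - b) * alive) v (alive - counts.getD v 0)

-- for idx, v in enumerate(food_times): if v > b: (if i == k: return idx + 1); i += 1
def solutionAltScan : List Int → Int → Int → Int → Int → Option Int
  | [], _, _, _, _ => none
  | v :: rest, b, k, idx, i =>
    if b < v then
      if i = k then some (idx + 1) else solutionAltScan rest b k (idx + 1) (i + 1)
    else solutionAltScan rest b k (idx + 1) i

def solution_alt (food_times : List Int) (k : Int) : Option Int :=
  if food_times.sum ≤ k then some (-1)
  else
    let counts := solutionAltCounts food_times
    let r := solutionAltLoop counts (PySem.List.sorted counts.keys (fun x => x)) k 0 (food_times.length : Int)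
    let s := if 0 < r.2.2 ∧ r.2.2 ≤ r.1
             then (PySem.Int.mod r.1 r.2.2, r.2.1 + PySem.Int.floordiv r.1 r.2.2)
             else (r.1, r.2.1)
    solutionAltScan food_times s.2 s.1 0 0

-- ===== PRECONDITION & SPEC =====
def Spec_solution (food_times : List Int) (k : Int) (out : Option Int) : Prop := out = solution_alt food_times k
instance (food_times : List Int) (k : Int) (out : Option Int) : Decidable (Spec_solution food_times k out) := by unfold Spec_solution; infer_instance

-- ===== CLAIM (what is proved, stated in full; the proofs are below) =====
def Claim_equal_solution : Prop := ∀ (food_times : List Int) (k : Int), Dom_solution food_times k → Spec_solution food_times k (solution food_times k)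

-- ===== LEMMAS AND PROOFS =====

-- N after the while loop has pushed b levels: len - #{u : 0 < u ≤ b}
def pvN (ft : List Int) (b : Int) : Int :=
  (ft.length : Int) - (ft.countP (fun u => decide (0 < u ∧ u ≤ b)) : Int)

-- remaining positive food above level b
def pvR (ft : List Int) (b : Int) : Int := (ft.map (fun u => max (u - b) 0)).sum

-- B's post-loop divmod step, as applied by solution_alt to the loop's (k, b, alive)
def pvFinish (r : Int × Int × Int) : Int × Int :=
  if 0 < r.2.2 ∧ r.2.2 ≤ r.1
  then (PySem.Int.mod r.1 r.2.2, r.2.1 + PySem.Int.floordiv r.1 r.2.2)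
  else (r.1, r.2.1)

lemma pvN_nonneg (ft : List Int) (b : Int) : 0 ≤ pvN ft b := by
  unfold pvN
  have := List.countP_le_length (p := fun u => decide (0 < u ∧ u ≤ b)) (l := ft)
  omega

lemma pvN_succ (ft : List Int) (b : Int) (hb : 0 ≤ b) :
    pvN ft (b + 1) = pvN ft b - (PySem.List.count ft (b + 1) : Int) := by
  rw [PySem.List.count_eq]
  unfold pvN
  induction ft with
  | nil => simp
  | cons a t ih =>
    simp only [List.countP_cons, List.count_cons, List.length_cons]
    split_ifs <;> simp only [decide_eq_true_eq, beq_iff_eq] at * <;> push_cast <;> omega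

lemma pvN_split (ft : List Int) (b : Int) (hb : 0 ≤ b) :
    pvN ft b = (ft.countP (fun u => decide (u ≤ 0)) : Int) + (ft.countP (fun u => decide (b < u)) : Int) := by
  unfold pvN
  induction ft with
  | nil => simp
  | cons a t ih =>
    simp only [List.countP_cons, List.length_cons]
    split_ifs <;> simp only [decide_eq_true_eq] at * <;> push_cast <;> omega

lemma sum_le_pvR_zero (ft : List Int) : ft.sum ≤ pvR ft 0 := by
  unfold pvR
  induction ft with
  | nil => simp
  | cons a t ih => simp only [List.map_cons, List.sum_cons]; have := le_max_left (a - 0) 0; omega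

lemma pvR_succ (ft : List Int) (b : Int) :
    pvR ft (b + 1) = pvR ft b - (ft.countP (fun u => decide (b < u)) : Int) := by
  unfold pvR
  induction ft with
  | nil => simp
  | cons a t ih =>
    simp only [List.map_cons, List.sum_cons, List.countP_cons]
    split_ifs with h <;> simp only [decide_eq_true_eq] at *
    · have e1 : max (a - (b+1)) 0 = a - (b+1) := by omega
      have e2 : max (a - b) 0 = a - b := by omega
      push_cast; omega
    · have e1 : max (a - (b+1)) 0 = 0 := by omega
      have e2 : max (a - b) 0 = 0 := by omega
      push_cast; omega

lemma pvR_eq_zero (ft : List Int) (b : Int) (hb : 0 ≤ b) (h : ∀ u ∈ ft, u ≤ b) : pvR ft b = 0 := by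
  unfold pvR
  induction ft with
  | nil => simp
  | cons a t ih =>
    have ha := h a (by simp)
    simp only [List.map_cons, List.sum_cons]
    rw [ih (fun u hu => h u (by simp [hu]))]
    have : max (a - b) 0 = 0 := by omega
    omega

lemma pvFinish_stop (k b alive : Int) (h : ¬ (0 < alive ∧ alive ≤ k)) :
    pvFinish (k, b, alive) = (k, b) := by
  unfold pvFinish
  rw [if_neg (by simpa using h)]

lemma pvFinish_shift (k b alive : Int) (h1 : 0 < alive) (h2 : alive ≤ k) :
    pvFinish (k, b, alive) = pvFinish (k - alive, b + 1, alive) := by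
  unfold pvFinish
  simp only [PySem.Int.mod_eq_emod_of_pos h1, PySem.Int.floordiv_eq_ediv_of_pos h1]
  rw [if_pos ⟨h1, h2⟩]
  by_cases h3 : alive ≤ k - alive
  · rw [if_pos ⟨h1, h3⟩]
    have hm : (k - alive) % alive = k % alive := Int.sub_emod_right k alive
    have hd : (k - alive) / alive + 1 = k / alive := by
      have h := Int.add_mul_ediv_right (k - alive) 1 (by omega : alive ≠ 0)
      rw [show k - alive + 1 * alive = k by ring] at h
      omega
    rw [hm, show b + k / alive = b + 1 + (k - alive) / alive by omega]
  · rw [if_neg (by omega)]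
    have hk0 : 0 ≤ k - alive := by omega
    have hlt : k - alive < alive := by omega
    have hm : k % alive = k - alive := by
      have := Int.sub_emod_right k alive
      rw [Int.emod_eq_of_lt hk0 hlt] at this; omega
    have hd : k / alive = 1 := by
      have h0 := Int.ediv_eq_zero_of_lt hk0 hlt
      have h := Int.add_mul_ediv_right (k - alive) 1 (by omega : alive ≠ 0)
      rw [show k - alive + 1 * alive = k by ring] at h
      omega
    rw [hm, hd]

lemma pvMain (ft : List Int) (counts : PySem.Dict Int Int)
    (hcnt : ∀ v : Int, 0 < v → counts.getD v 0 = (List.count v ft : Int)) :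
    ∀ (fuel : Nat) (k b : Int) (ls : List Int),
      k.toNat < fuel → 0 ≤ b →
      List.Pairwise (· < ·) ls →
      (∀ v ∈ ls, v ∈ ft ∧ b < v) →
      (∀ u ∈ ft, b < u → u ∈ ls) →
      k < pvR ft b →
      solutionWhile ft fuel k b (pvN ft b) = pvFinish (solutionAltLoop counts ls k b (pvN ft b)) := by
  intro fuel
  induction fuel with
  | zero => intro k b ls hf; omega
  | succ m ih =>
    intro k b ls hf hb hsort hmem1 hmem2 hR
    have hN0 : 0 ≤ pvN ft b := pvN_nonneg ft b
    by_cases hstop : k < pvN ft b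
    · -- A's while stops at once; B's loop breaks and the divmod does nothing
      simp only [solutionWhile]
      rw [if_neg (by omega)]
      cases ls with
      | nil =>
        simp only [solutionAltLoop]
        rw [pvFinish_stop _ _ _ (by omega)]
      | cons v rest =>
        have hv := hmem1 v (List.mem_cons_self)
        have hk1 : k < (v - b) * pvN ft b := by
          calc k < pvN ft b := hstop
          _ = 1 * pvN ft b := (one_mul _).symm
          _ ≤ (v - b) * pvN ft b := by
                apply mul_le_mul_of_nonneg_right _ hN0
                omega
        simp only [solutionAltLoop]
        rw [if_pos hk1]
        rw [pvFinish_stop _ _ _ (by omega)]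
    · -- A's while executes one round
      have hkN : pvN ft b ≤ k := by omega
      have hN1 : 1 ≤ pvN ft b := by
        by_contra hc
        have hsplit := pvN_split ft b hb
        have hz : ft.countP (fun u => decide (u ≤ 0)) = 0 := by omega
        have hP : ft.countP (fun u => decide (b < u)) = 0 := by omega
        have hall : ∀ u ∈ ft, u ≤ b := by
          intro u hu
          have h1 := List.countP_eq_zero.mp hz u hu
          have h2 := List.countP_eq_zero.mp hP u hu
          simp only [decide_eq_true_eq] at h1 h2
          omega
        have := pvR_eq_zero ft b hb hall
        omega
      simp only [solutionWhile]
      rw [if_pos hkN]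
      rw [show pvN ft b - (PySem.List.count ft (b + 1) : Int) = pvN ft (b + 1) from
            (pvN_succ ft b hb).symm]
      have hf' : (k - pvN ft b).toNat < m := by omega
      have hR' : k - pvN ft b < pvR ft (b + 1) := by
        have hs := pvR_succ ft b
        have hsplit := pvN_split ft b hb
        omega
      cases ls with
      | nil =>
        have hcount0 : List.count (b + 1) ft = 0 := by
          rw [List.count_eq_zero]
          intro hmem
          exact absurd (hmem2 (b + 1) hmem (by omega)) (List.not_mem_nil)
        have hNe : pvN ft (b + 1) = pvN ft b := by
          have := pvN_succ ft b hb
          rw [PySem.List.count_eq, hcount0] at this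
          omega
        rw [ih (k - pvN ft b) (b + 1) [] hf' (by omega) List.Pairwise.nil
            (by intro v hv; exact absurd hv (List.not_mem_nil))
            (by intro u hu hub; exact hmem2 u hu (by omega)) hR']
        simp only [solutionAltLoop, hNe]
        exact (pvFinish_shift k b (pvN ft b) (by omega) hkN).symm
      | cons v rest =>
        have hv := hmem1 v (List.mem_cons_self)
        have hbv : b < v := hv.2
        have hvrest : ∀ w ∈ rest, v < w := fun w hw => List.rel_of_pairwise_cons hsort hw
        have hsort' : List.Pairwise (· < ·) rest := hsort.of_cons
        have hNb1 : 1 ≤ v - b := by omega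
        have hgev : pvN ft b ≤ (v - b) * pvN ft b := by
          calc pvN ft b = 1 * pvN ft b := (one_mul _).symm
          _ ≤ (v - b) * pvN ft b := by
                apply mul_le_mul_of_nonneg_right _ hN0
                omega
        by_cases hv1 : v = b + 1
        · -- the head level is consumed in this round
          have hcv : counts.getD v 0 = (List.count v ft : Int) := hcnt v (by omega)
          have hNe : pvN ft (b + 1) = pvN ft b - counts.getD v 0 := by
            rw [hcv, hv1, pvN_succ ft b hb, PySem.List.count_eq]
          rw [ih (k - pvN ft b) (b + 1) rest hf' (by omega) hsort'
              (by intro w hw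
                  refine ⟨(hmem1 w (List.mem_cons_of_mem v hw)).1, ?_⟩
                  have := hvrest w hw; omega)
              (by intro u hu hub
                  have := hmem2 u hu (by omega)
                  rcases List.mem_cons.mp this with h | h
                  · omega
                  · exact h) hR']
          have hnot : ¬ k < (v - b) * pvN ft b := by
            rw [hv1, show b + 1 - b = (1:Int) by ring, one_mul]; omega
          conv_rhs => rw [solutionAltLoop]
          rw [if_neg hnot]
          rw [show k - (v - b) * pvN ft b = k - pvN ft b by rw [hv1]; ring, ← hNe, hv1]
        · -- no level boundary between b and b+1: the distinct-value list is unchanged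
          have hb1v : b + 1 < v := by omega
          have hcount0 : List.count (b + 1) ft = 0 := by
            rw [List.count_eq_zero]
            intro hmem
            have := hmem2 (b + 1) hmem (by omega)
            rcases List.mem_cons.mp this with h | h
            · omega
            · have := hvrest _ h; omega
          have hNe : pvN ft (b + 1) = pvN ft b := by
            have := pvN_succ ft b hb
            rw [PySem.List.count_eq, hcount0] at this
            omega
          rw [ih (k - pvN ft b) (b + 1) (v :: rest) hf' (by omega) hsort
              (by intro w hw
                  rcases List.mem_cons.mp hw with h | h
                  · subst h; exact ⟨hv.1, hb1v⟩
                  · refine ⟨(hmem1 w (List.mem_cons_of_mem v h)).1, ?_⟩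
                    have := hvrest w h; omega)
              (by intro u hu hub; exact hmem2 u hu (by omega)) hR']
          rw [hNe]
          have hexp : (v - (b + 1)) * pvN ft b = (v - b) * pvN ft b - pvN ft b := by ring
          by_cases hbr : k < (v - b) * pvN ft b
          · conv_lhs => rw [solutionAltLoop]
            conv_rhs => rw [solutionAltLoop]
            rw [if_pos (by rw [hexp]; omega), if_pos hbr]
            exact (pvFinish_shift k b (pvN ft b) (by omega) hkN).symm
          · conv_lhs => rw [solutionAltLoop]
            conv_rhs => rw [solutionAltLoop]
            rw [if_neg (by rw [hexp]; omega), if_neg hbr]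
            rw [show k - pvN ft b - (v - (b + 1)) * pvN ft b = k - (v - b) * pvN ft b by ring]

lemma scan_eq (b : Int) : ∀ (rest : List Int) (k idx i : Int),
    solutionAltScan rest b k idx i = solutionFor rest b (k - i) idx := by
  intro rest
  induction rest with
  | nil => intro k idx i; rfl
  | cons v t ih =>
    intro k idx i
    simp only [solutionAltScan, solutionFor]
    by_cases hv : b < v
    · rw [if_pos hv, if_pos (by omega : (0:Int) < v - b)]
      by_cases he : i = k
      · rw [if_pos he, if_pos (by omega)]
      · rw [if_neg he, if_neg (by omega), ih]
        congr 1; omega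
    · rw [if_neg hv, if_neg (by omega : ¬ (0:Int) < v - b), ih]

lemma counts_getD (ft : List Int) (v : Int) (hv : 0 < v) :
    (solutionAltCounts ft).getD v 0 = (List.count v ft : Int) := by
  unfold solutionAltCounts
  rw [PySem.List.foldl_ite_eq_foldl_filter (fun x : Int => 0 < x)
        (fun (d : PySem.Dict Int Int) (x : Int) => d.insert x (d.getD x 0 + 1)) ft PySem.Dict.empty]
  rw [PySem.Dict.getD_foldl_insert_add_one]
  rw [PySem.Dict.getD_empty, List.count_filter (by simpa using hv)]
  omega

lemma counts_keys (ft : List Int) :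
    (solutionAltCounts ft).keys = PySem.Set.ofList (ft.filter (fun x => decide (0 < x))) := by
  unfold solutionAltCounts
  rw [PySem.List.foldl_ite_eq_foldl_filter (fun x : Int => 0 < x)
        (fun (d : PySem.Dict Int Int) (x : Int) => d.insert x (d.getD x 0 + 1)) ft PySem.Dict.empty]
  rw [PySem.Dict.keys_foldl_insert, PySem.Dict.keys_empty, PySem.Set.ofList_eq_foldl]
  rfl

-- ===== VERDICT (by name: the statement is the Claim_ definition above) =====
theorem solution_spec : Claim_equal_solution := by
  intro ft k _
  unfold Spec_solution
  by_cases hg : ft.sum ≤ k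
  · simp only [solution, solution_alt, if_pos hg]
  · simp only [solution, solution_alt, if_neg hg]
    have hcnt : ∀ v : Int, 0 < v → (solutionAltCounts ft).getD v 0 = (List.count v ft : Int) :=
      fun v hv => counts_getD ft v hv
    have hmemkeys : ∀ x : Int, x ∈ (solutionAltCounts ft).keys ↔ x ∈ ft ∧ 0 < x := by
      intro x
      rw [counts_keys, PySem.Set.mem_ofList, List.mem_filter]
      simp
    have hnodup : (solutionAltCounts ft).keys.Nodup := by
      rw [counts_keys]; exact PySem.Set.nodup_ofList _
    have hsortle : List.Pairwise (fun a b : Int => a ≤ b)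
        (PySem.List.sorted (solutionAltCounts ft).keys (fun x => x)) :=
      PySem.List.sorted_pairwise _ _
    have hsortnd : (PySem.List.sorted (solutionAltCounts ft).keys (fun x => x)).Nodup :=
      (PySem.List.sorted_perm _ _ _).symm.nodup hnodup
    have hsort : List.Pairwise (· < ·)
        (PySem.List.sorted (solutionAltCounts ft).keys (fun x => x)) :=
      (hsortle.and hsortnd).imp (fun h => lt_of_le_of_ne h.1 h.2)
    have hmem1 : ∀ v ∈ PySem.List.sorted (solutionAltCounts ft).keys (fun x => x), v ∈ ft ∧ (0:Int) < v := by
      intro v hv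
      rw [PySem.List.mem_sorted, hmemkeys] at hv
      exact hv
    have hmem2 : ∀ u ∈ ft, (0:Int) < u → u ∈ PySem.List.sorted (solutionAltCounts ft).keys (fun x => x) := by
      intro u hu hu0
      rw [PySem.List.mem_sorted, hmemkeys]
      exact ⟨hu, hu0⟩
    have hN00 : pvN ft 0 = (ft.length : Int) := by
      unfold pvN
      rw [List.countP_eq_zero.mpr (by intro u hu; simp)]
      omega
    have hR0 : k < pvR ft 0 := lt_of_lt_of_le (by omega) (sum_le_pvR_zero ft)
    have hmain := pvMain ft (solutionAltCounts ft) hcnt (k.toNat + 1) k 0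
      (PySem.List.sorted (solutionAltCounts ft).keys (fun x => x))
      (by omega) le_rfl hsort hmem1 hmem2 hR0
    rw [← hN00, hmain, scan_eq, sub_zero]
    rfl
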